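-- pv_equiv track=rewrite | github.com/AHWALab/TITOWA_1km | tito_utils/qpe_utils/hsaf_retrieve.py | _format_stderr
-- ===== SOURCE A (Python) =====
-- def _format_stderr(stderr_text, max_lines=12):
--     if not stderr_text:
--         return "<no stderr output>"
--     lines = [ln for ln in stderr_text.strip().splitlines() if ln.strip()]
--     if not lines:
--         return "<no stderr output>"
--     if len(lines) > max_lines:
--         lines = lines[-max_lines:]
--     return "\n".join(lines)
-- ===== SOURCE B (Python) =====
-- def _format_stderr(stderr_text, max_lines=12):
--     if not stderr_text:
--         return "<no stderr output>"
--     kept = []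
--     for ln in reversed(stderr_text.strip().splitlines()):
--         if ln.strip():
--             kept.append(ln)
--             if len(kept) == max_lines:
--                 break
--     if not kept:
--         return "<no stderr output>"
--     kept.reverse()
--     return "\n".join(kept)
-- ===== Notes on version B (the rewrite author's own statement) =====
-- stated objective: alternative
-- what changed: Instead of materialising the full filtered line list and slicing off its last max_lines, B scans the split lines backwards, collecting nonblank lines and breaking as soon as max_lines are collected, then reverses the buffer and joins.
-- outside the precondition, e.g. on _format_stderr('a\nb\nc', -1): A returns 'b\nc', B returns 'a\nb\nc'
import Mathlib
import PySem

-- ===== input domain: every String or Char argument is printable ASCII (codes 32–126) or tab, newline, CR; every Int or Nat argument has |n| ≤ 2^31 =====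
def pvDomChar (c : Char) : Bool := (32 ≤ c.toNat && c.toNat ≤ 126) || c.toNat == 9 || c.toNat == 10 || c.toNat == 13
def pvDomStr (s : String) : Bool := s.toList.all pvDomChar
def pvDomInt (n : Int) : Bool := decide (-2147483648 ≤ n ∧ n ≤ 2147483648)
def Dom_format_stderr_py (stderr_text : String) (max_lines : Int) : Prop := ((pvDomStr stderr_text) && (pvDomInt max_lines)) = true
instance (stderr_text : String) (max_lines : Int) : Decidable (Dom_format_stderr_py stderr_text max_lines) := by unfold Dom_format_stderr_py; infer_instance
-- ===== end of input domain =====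

-- B replaces "build the full filtered list, then slice the last max_lines" by a single
-- backward scan with an early break once max_lines nonblank lines are collected (alternative
-- decomposition, same cost); equivalence is proved for max_lines ≥ 0 (see Pre_).


-- ===== PORT A =====
def format_stderr_py (stderr_text : String) (max_lines : Int) : String :=
  if stderr_text = "" then "<no stderr output>"
  else
    let lines := (PySem.Str.splitlines (PySem.Str.strip stderr_text)).filter
      (fun ln => PySem.Str.strip ln ≠ "")
    if lines = [] then "<no stderr output>"
    else
      let lines := if (lines.length : Int) > max_lines
        then PySem.List.slice lines (some (-max_lines)) none
        else lines
      PySem.Str.join "\n" lines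

-- ===== PORT B =====
-- the backward loop of Source B: append each nonblank line, break when the buffer length hits max_lines
def pvCollect (ls : List String) (max_lines : Int) (kept : List String) : List String :=
  match ls with
  | [] => kept
  | ln :: rest =>
    if PySem.Str.strip ln ≠ "" then
      let kept' := kept ++ [ln]
      if ((kept'.length : Int) == max_lines) then kept'
      else pvCollect rest max_lines kept'
    else pvCollect rest max_lines kept

def format_stderr_py_alt (stderr_text : String) (max_lines : Int) : String :=
  if stderr_text = "" then "<no stderr output>"
  else
    let kept := pvCollect (PySem.Str.splitlines (PySem.Str.strip stderr_text)).reverse max_lines []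
    if kept = [] then "<no stderr output>"
    else PySem.Str.join "\n" kept.reverse

-- ===== PRECONDITION & SPEC =====
-- Pre_ excludes negative max_lines: a negative line cap is a corner no caller would specify —
-- there A's slice lines[-max_lines:] becomes a positive-index slice that DROPS lines from the
-- FRONT (an accident of slice-sign arithmetic), while B's loop simply keeps every nonblank line;
-- both values are unspecified-corner choices, so those inputs are left outside the claim.
def Pre_format_stderr_py (stderr_text : String) (max_lines : Int) : Prop := 0 ≤ max_lines
instance (stderr_text : String) (max_lines : Int) : Decidable (Pre_format_stderr_py stderr_text max_lines) := by unfold Pre_format_stderr_py; infer_instance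
def pvWitness_format_stderr_py : String × Int := ("err: fail\n  trace\n\nboom", 2)
def Spec_format_stderr_py (stderr_text : String) (max_lines : Int) (out : String) : Prop := out = format_stderr_py_alt stderr_text max_lines
instance (stderr_text : String) (max_lines : Int) (out : String) : Decidable (Spec_format_stderr_py stderr_text max_lines out) := by unfold Spec_format_stderr_py; infer_instance

-- ===== CLAIM (what is proved, stated in full; the proofs are below) =====
def Claim_equal_format_stderr_py : Prop := ∀ (stderr_text : String) (max_lines : Int), Dom_format_stderr_py stderr_text max_lines → Pre_format_stderr_py stderr_text max_lines → Spec_format_stderr_py stderr_text max_lines (format_stderr_py stderr_text max_lines)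

-- ===== LEMMAS AND PROOFS =====

-- with max_lines = 0 the break test 'len(kept) == 0' can never fire: the loop keeps every nonblank line
theorem pvCollect_zero (ls : List String) (kept : List String) :
    pvCollect ls 0 kept = kept ++ ls.filter (fun ln => PySem.Str.strip ln ≠ "") := by
  induction ls generalizing kept with
  | nil => simp [pvCollect]
  | cons ln rest ih =>
    by_cases h : PySem.Str.strip ln ≠ ""
    · simp only [pvCollect, if_pos h]
      rw [if_neg (by intro hc; simp only [beq_iff_eq, List.length_append, List.length_cons,
        List.length_nil, Nat.cast_add, Nat.cast_one] at hc; omega), ih]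
      simp [h]
    · simp only [pvCollect, if_neg h]
      rw [ih]
      simp only [ne_eq, Decidable.not_not] at h
      simp [h]

-- with a positive bound the loop returns the first (n - kept.length) nonblank lines it meets
theorem pvCollect_pos (ls : List String) (n : Nat) (kept : List String) (h : kept.length < n) :
    pvCollect ls (n : Int) kept
      = kept ++ (ls.filter (fun ln => PySem.Str.strip ln ≠ "")).take (n - kept.length) := by
  induction ls generalizing kept with
  | nil => simp [pvCollect]
  | cons ln rest ih =>
    by_cases hq : PySem.Str.strip ln ≠ ""
    · simp only [pvCollect, if_pos hq]
      by_cases hstop : (kept ++ [ln]).length = n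
      · rw [if_pos (by simp [hstop])]
        have htake : n - kept.length = 1 := by simp [List.length_append] at hstop; omega
        simp [hq, htake]
      · have hlt : (kept ++ [ln]).length < n := by
          simp only [List.length_append, List.length_cons, List.length_nil] at hstop ⊢
          omega
        rw [if_neg (by simp only [beq_iff_eq, Int.natCast_inj]; exact hstop), ih _ hlt]
        have htake : n - kept.length = (n - (kept ++ [ln]).length) + 1 := by
          simp only [List.length_append, List.length_cons, List.length_nil] at hlt ⊢
          omega
        simp [hq, htake, List.take_succ_cons]
    · simp only [pvCollect, if_neg hq]
      rw [ih _ h]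
      simp only [ne_eq, Decidable.not_not] at hq
      simp [hq]

-- Python's lines[-n:] for 0 < n < len(lines) is "the last n lines"
theorem slice_neg_last {α : Type} (xs : List α) (n : Nat) (hn : 0 < n) (h2 : n < xs.length) :
    PySem.List.slice xs (some (-(n : Int))) none = xs.drop (xs.length - n) := by
  have h3 : ¬ ((xs.length : Int) + -(n : Int) < 0) := by omega
  simp only [PySem.List.slice, PySem.List.clampIdx, if_pos (by omega : -(n : Int) < 0), if_neg h3]
  have h4 : ((xs.length : Int) + -(n : Int)).toNat = xs.length - n := by omega
  rw [h4]
  apply List.take_of_length_le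
  simp

-- ===== VERDICT (by name: the statement is the Claim_ definition above) =====
theorem format_stderr_py_spec : Claim_equal_format_stderr_py := by
  intro s m _hdom hpre
  unfold Spec_format_stderr_py format_stderr_py format_stderr_py_alt
  by_cases hs : s = ""
  · rw [if_pos hs, if_pos hs]
  · rw [if_neg hs, if_neg hs]
    dsimp only
    generalize (PySem.Str.splitlines (PySem.Str.strip s)) = ls
    obtain ⟨n, rfl⟩ : ∃ n : Nat, m = (n : Int) := ⟨m.toNat, (Int.toNat_of_nonneg hpre).symm⟩
    rcases Nat.eq_zero_or_pos n with hn | hn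
    · subst hn
      rw [Nat.cast_zero, pvCollect_zero, List.nil_append, List.filter_reverse]
      by_cases hF : ls.filter (fun ln => PySem.Str.strip ln ≠ "") = []
      · rw [if_pos hF, if_pos (List.reverse_eq_nil_iff.mpr hF)]
      · have hrev : ¬ (ls.filter (fun ln => PySem.Str.strip ln ≠ "")).reverse = [] := by
          rw [List.reverse_eq_nil_iff]; exact hF
        have hlen : ((ls.filter (fun ln => PySem.Str.strip ln ≠ "")).length : Int) > 0 := by
          have h := List.length_pos_iff.mpr hF; omega
        have hslice : PySem.List.slice (ls.filter (fun ln => PySem.Str.strip ln ≠ "")) (some (-0)) none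
            = ls.filter (fun ln => PySem.Str.strip ln ≠ "") := by
          simp [PySem.List.slice, PySem.List.clampIdx]
        rw [if_neg hF, if_neg hrev, if_pos hlen, hslice, List.reverse_reverse]
    · rw [pvCollect_pos ls.reverse n [] (by simpa using hn), List.nil_append,
        List.filter_reverse]
      simp only [List.length_nil, Nat.sub_zero]
      by_cases hF : ls.filter (fun ln => PySem.Str.strip ln ≠ "") = []
      · rw [if_pos hF, if_pos (by rw [List.take_eq_nil_iff]; right; rw [List.reverse_eq_nil_iff]; exact hF)]
      · have hkne : ¬ (ls.filter (fun ln => PySem.Str.strip ln ≠ "")).reverse.take n = [] := by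
          simp only [List.take_eq_nil_iff, List.reverse_eq_nil_iff]
          exact not_or.mpr ⟨by omega, hF⟩
        rw [if_neg hF, if_neg hkne, List.take_reverse, List.reverse_reverse]
        by_cases hgt : ((ls.filter (fun ln => PySem.Str.strip ln ≠ "")).length : Int) > (n : Int)
        · rw [if_pos hgt, slice_neg_last _ n hn (by exact_mod_cast hgt)]
        · rw [if_neg hgt,
            show (ls.filter (fun ln => PySem.Str.strip ln ≠ "")).length - n = 0 by omega,
            List.drop_zero]
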